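-- pv_equiv track=rewrite | github.com/OrlovAlexandr/test_drive_detector | src/utils/recalibrate_spaces.py | get_full_lot_ranges
-- ===== SOURCE A (Python) =====
-- def get_full_lot_ranges(timestamps: list[int], max_gap: int = 3) -> list[tuple[int, int]]:
--     """Find ranges with more than full parking lot."""
--     ranges = []
--     start_time = timestamps[0]
--     end_time = timestamps[0]
--
--     for timestamp in timestamps[1:]:
--         if timestamp - end_time <= max_gap:
--             end_time = timestamp
--         else:
--             ranges.append((start_time, end_time))
--             start_time = timestamp
--             end_time = timestamp
--     ranges.append((start_time, end_time))
--
--     return ranges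
-- ===== SOURCE B (Python) =====
-- def get_full_lot_ranges(timestamps: list[int], max_gap: int = 3) -> list[tuple[int, int]]:
--     """Find ranges with more than full parking lot."""
--     n = len(timestamps)
--     breaks = [i for i in range(1, n) if timestamps[i] - timestamps[i - 1] > max_gap]
--     bounds = [0] + breaks + [n]
--     return [(timestamps[s], timestamps[e - 1]) for s, e in zip(bounds, bounds[1:])]
-- ===== Notes on version B (the rewrite author's own statement) =====
-- stated objective: alternative
-- what changed: Replaces A's single stateful accumulator loop (running start/end pair) with a two-pass breakpoints-then-partition decomposition: first collect the indices where the gap exceeds max_gap, then emit one (first, last) pair per consecutive boundary pair.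
import Mathlib
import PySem

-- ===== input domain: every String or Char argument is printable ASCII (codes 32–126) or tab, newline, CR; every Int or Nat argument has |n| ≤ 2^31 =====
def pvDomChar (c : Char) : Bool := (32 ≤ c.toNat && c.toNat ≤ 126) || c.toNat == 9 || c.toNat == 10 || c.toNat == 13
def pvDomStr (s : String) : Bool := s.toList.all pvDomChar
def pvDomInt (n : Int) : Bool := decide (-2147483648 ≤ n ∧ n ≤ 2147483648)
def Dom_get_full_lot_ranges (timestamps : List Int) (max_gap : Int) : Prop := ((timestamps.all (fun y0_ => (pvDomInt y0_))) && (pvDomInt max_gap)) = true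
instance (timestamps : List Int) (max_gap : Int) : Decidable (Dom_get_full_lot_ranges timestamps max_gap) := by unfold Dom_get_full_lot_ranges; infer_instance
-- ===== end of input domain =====

-- B replaces A's single stateful accumulator loop with a two-pass breakpoints-then-partition
-- decomposition (alternative, same cost); equivalence of the RETURN value on nonempty input.

-- ===== PORT A =====
def get_full_lot_ranges (timestamps : List Int) (max_gap : Int) : List (Int × Int) :=
  match timestamps with
  | [] => []  -- Python raises IndexError on timestamps[0] here (excluded by Pre_)
  | t0 :: _ =>
    let r := (PySem.List.slice timestamps (some 1) none).foldl
      (fun (s : List (Int × Int) × Int × Int) timestamp =>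
        if timestamp - s.2.2 ≤ max_gap then (s.1, s.2.1, timestamp)
        else (s.1 ++ [(s.2.1, s.2.2)], timestamp, timestamp))
      ([], t0, t0)
    r.1 ++ [(r.2.1, r.2.2)]

-- ===== PORT B =====
-- total form of Python's timestamps[i]; every index B uses is in range when timestamps ≠ []
def pyAt (xs : List Int) (i : Int) : Int := PySem.List.pyGetD xs i 0

def get_full_lot_ranges_alt (timestamps : List Int) (max_gap : Int) : List (Int × Int) :=
  let n : Int := timestamps.length
  let breaks := (PySem.List.pyRange 1 n 1).filter
    (fun i => max_gap < pyAt timestamps i - pyAt timestamps (i - 1))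
  let bounds := 0 :: (breaks ++ [n])
  ((bounds.zip (PySem.List.slice bounds (some 1) none)).map
    (fun se => (pyAt timestamps se.1, pyAt timestamps (se.2 - 1))))

-- ===== PRECONDITION & SPEC =====
-- Pre_ excludes exactly the empty list, on which Python A raises IndexError.
def Pre_get_full_lot_ranges (timestamps : List Int) (max_gap : Int) : Prop := timestamps ≠ []
instance (timestamps : List Int) (max_gap : Int) : Decidable (Pre_get_full_lot_ranges timestamps max_gap) := by unfold Pre_get_full_lot_ranges; infer_instance
def pvWitness_get_full_lot_ranges : List Int × Int := ([1, 2, 8, 9], 3)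

def Spec_get_full_lot_ranges (timestamps : List Int) (max_gap : Int) (out : List (Int × Int)) : Prop := out = get_full_lot_ranges_alt timestamps max_gap
instance (timestamps : List Int) (max_gap : Int) (out : List (Int × Int)) : Decidable (Spec_get_full_lot_ranges timestamps max_gap out) := by unfold Spec_get_full_lot_ranges; infer_instance

-- ===== CLAIM (what is proved, stated in full; the proofs are below) =====
def Claim_equal_get_full_lot_ranges : Prop := ∀ (timestamps : List Int) (max_gap : Int), Dom_get_full_lot_ranges timestamps max_gap → Pre_get_full_lot_ranges timestamps max_gap → Spec_get_full_lot_ranges timestamps max_gap (get_full_lot_ranges timestamps max_gap)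

-- ===== LEMMAS AND PROOFS =====

-- reference grouping both ports are reduced to
def chunks (mg : Int) (st en : Int) : List Int → List (Int × Int)
  | [] => [(st, en)]
  | t :: rest => if t - en ≤ mg then chunks mg st t rest else (st, en) :: chunks mg t t rest

def setFst (v : Int) : List (Int × Int) → List (Int × Int)
  | [] => []
  | (_, b) :: r => (v, b) :: r

theorem pyAt_cons_succ (a : Int) (l : List Int) (j : Int) (hj : 0 ≤ j) :
    pyAt (a :: l) (j + 1) = pyAt l j := by
  simp only [pyAt, PySem.List.pyGetD, PySem.List.pyGet?, PySem.List.pyIdx?, List.length_cons]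
  rw [if_pos (by omega : (0:Int) ≤ j + 1), if_pos hj]
  by_cases h : j < (l.length : Int)
  · rw [if_pos (by push_cast; omega), if_pos h]
    have h1 : (j + 1).toNat = j.toNat + 1 := by omega
    simp [h1]
  · rw [if_neg (by push_cast; omega), if_neg h]
    simp

theorem pyAt_cons_pred (a : Int) (l : List Int) (e : Int) (he : 1 ≤ e) :
    pyAt (a :: l) e = pyAt l (e - 1) := by
  have h := pyAt_cons_succ a l (e - 1) (by omega)
  simpa using h

theorem pyAt_zero (a : Int) (l : List Int) : pyAt (a :: l) 0 = a := by
  simp [pyAt]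

theorem chunks_setFst (mg : Int) (rest : List Int) : ∀ (st st' en : Int),
    setFst st (chunks mg st' en rest) = chunks mg st en rest := by
  induction rest with
  | nil => intro st st' en; simp [chunks, setFst]
  | cons t r ih =>
    intro st st' en
    by_cases h : t - en ≤ mg
    · simp only [chunks, if_pos h]; exact ih st st' t
    · simp only [chunks, if_neg h, setFst]

-- A's fold equals chunks
theorem foldA (mg : Int) (rest : List Int) : ∀ (s : List (Int × Int) × Int × Int),
    ((rest.foldl
      (fun (s : List (Int × Int) × Int × Int) t =>
        if t - s.2.2 ≤ mg then (s.1, s.2.1, t)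
        else (s.1 ++ [(s.2.1, s.2.2)], t, t)) s).1 ++
     [((rest.foldl
      (fun (s : List (Int × Int) × Int × Int) t =>
        if t - s.2.2 ≤ mg then (s.1, s.2.1, t)
        else (s.1 ++ [(s.2.1, s.2.2)], t, t)) s).2.1,
       (rest.foldl
      (fun (s : List (Int × Int) × Int × Int) t =>
        if t - s.2.2 ≤ mg then (s.1, s.2.1, t)
        else (s.1 ++ [(s.2.1, s.2.2)], t, t)) s).2.2)])
      = s.1 ++ chunks mg s.2.1 s.2.2 rest := by
  induction rest with
  | nil => intro s; simp [chunks]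
  | cons t r ih =>
    intro s
    by_cases h : t - s.2.2 ≤ mg
    · simp only [List.foldl_cons, if_pos h]
      rw [ih]
      simp [chunks, h]
    · simp only [List.foldl_cons, if_neg h]
      rw [ih]
      simp [chunks, h]

theorem portA_eq_chunks (mg t0 : Int) (rest : List Int) :
    get_full_lot_ranges (t0 :: rest) mg = chunks mg t0 t0 rest := by
  simp only [get_full_lot_ranges, PySem.List.slice_from_one, List.tail_cons]
  simpa using foldA mg rest ([], t0, t0)

-- the break indices of (t0 :: ys) are the head-gap test plus ys's breaks shifted by one
theorem breaks_cons (mg t0 x : Int) (xs : List Int) :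
    ((PySem.List.pyRange 1 ((t0 :: x :: xs).length : Int) 1).filter
      (fun i => decide (mg < pyAt (t0 :: x :: xs) i - pyAt (t0 :: x :: xs) (i - 1)))) =
    (if mg < x - t0 then [1] else []) ++
    ((PySem.List.pyRange 1 ((x :: xs).length : Int) 1).filter
      (fun i => decide (mg < pyAt (x :: xs) i - pyAt (x :: xs) (i - 1)))).map (· + 1) := by
  have hn : (1 : Int) < ((t0 :: x :: xs).length : Int) := by simp
  rw [PySem.List.pyRange_one_cons hn]
  have hshift : PySem.List.pyRange 2 ((t0 :: x :: xs).length : Int) 1 =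
      (PySem.List.pyRange 1 ((x :: xs).length : Int) 1).map (· + 1) := by
    simp only [PySem.List.pyRange_one, List.map_map]
    have : ((((t0 :: x :: xs).length : Int)) - 2).toNat = ((((x :: xs).length : Int)) - 1).toNat := by
      simp; omega
    rw [this]
    apply List.map_congr_left
    intro k _; simp only [Function.comp]; omega
  have hhead : pyAt (t0 :: x :: xs) 1 - pyAt (t0 :: x :: xs) (1 - 1) = x - t0 := by
    have := pyAt_cons_succ t0 (x :: xs) 0 (le_refl 0)
    simp at this
    simp [this, pyAt_zero]
  rw [List.filter_cons]
  rw [show (1:Int) + 1 = 2 from by norm_num, hshift, List.filter_map, hhead]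
  have htail : (List.filter ((fun i => decide (mg < pyAt (t0 :: x :: xs) i - pyAt (t0 :: x :: xs) (i - 1))) ∘ (fun i => i + 1)) (PySem.List.pyRange 1 ((x :: xs).length : Int) 1)) = List.filter (fun i => decide (mg < pyAt (x :: xs) i - pyAt (x :: xs) (i - 1))) (PySem.List.pyRange 1 ((x :: xs).length : Int) 1) := by
    apply List.filter_congr
    intro i hi
    have hmem := (PySem.List.mem_pyRange_one).1 hi
    have h1 : pyAt (t0 :: x :: xs) (i + 1) = pyAt (x :: xs) i :=
      pyAt_cons_succ t0 (x :: xs) i (by omega)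
    have h2 : pyAt (t0 :: x :: xs) i = pyAt (x :: xs) (i - 1) :=
      pyAt_cons_pred t0 (x :: xs) i (by omega)
    simp [Function.comp, h1, h2]
  rw [htail]
  by_cases h : mg < x - t0 <;> simp [h]

-- shifting every bound by one and prepending t0 leaves the sampled segment values over ys
theorem segs_shift (t0 : Int) (ys : List Int) (B : List Int)
    (h0 : ∀ s ∈ B, 0 ≤ s) (h1 : ∀ e ∈ B.tail, 1 ≤ e) :
    (((B.map (· + 1)).zip (B.map (· + 1)).tail).map
      (fun se => (pyAt (t0 :: ys) se.1, pyAt (t0 :: ys) (se.2 - 1)))) =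
    ((B.zip B.tail).map (fun se => (pyAt ys se.1, pyAt ys (se.2 - 1)))) := by
  rw [← List.map_tail, List.zip_map, List.map_map]
  apply List.map_congr_left
  intro ⟨s, e⟩ hmem
  have ⟨hs, he⟩ := List.of_mem_zip hmem
  have hs0 : 0 ≤ s := h0 s hs
  have he1 : 1 ≤ e := h1 e he
  have h1' : pyAt (t0 :: ys) (s + 1) = pyAt ys s := pyAt_cons_succ t0 ys s hs0
  have h2' : pyAt (t0 :: ys) e = pyAt ys (e - 1) :=
    pyAt_cons_pred t0 ys e he1
  simp [Function.comp, h1', h2']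

theorem portB_cons (mg t0 x : Int) (xs : List Int) :
    get_full_lot_ranges_alt (t0 :: x :: xs) mg =
    (if mg < x - t0 then (t0, t0) :: get_full_lot_ranges_alt (x :: xs) mg
     else setFst t0 (get_full_lot_ranges_alt (x :: xs) mg)) := by
  have hlen : ((t0 :: x :: xs).length : Int) = ((x :: xs).length : Int) + 1 := by
    simp
  have htys1 : ∀ e ∈ ((PySem.List.pyRange 1 ((x :: xs).length : Int) 1).filter
      (fun i => decide (mg < pyAt (x :: xs) i - pyAt (x :: xs) (i - 1))) ++
      [((x :: xs).length : Int)]), 1 ≤ e := by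
    intro e he
    rcases List.mem_append.1 he with h | h
    · exact ((PySem.List.mem_pyRange_one).1 (List.mem_of_mem_filter h)).1
    · simp at h
      subst h
      simp
  unfold get_full_lot_ranges_alt
  simp only [PySem.List.slice_from_one, List.tail_cons]
  rw [breaks_cons, hlen]
  set brY := List.filter (fun i => decide (mg < pyAt (x :: xs) i - pyAt (x :: xs) (i - 1)))
      (PySem.List.pyRange 1 ((x :: xs).length : Int) 1) with hbr
  set m : Int := ((x :: xs).length : Int) with hm
  have hmap : brY.map (fun i => i + 1) ++ [m + 1] = (brY ++ [m]).map (fun i => i + 1) := by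
    simp
  have htys0 : ∀ s ∈ (0 : Int) :: (brY ++ [m]), 0 ≤ s := by
    intro s hs
    rcases List.mem_cons.1 hs with h | h
    · omega
    · have := htys1 s h; omega
  by_cases h : mg < x - t0
  · simp only [if_pos h, List.singleton_append]
    have hcons : (1 : Int) :: (brY.map (fun i => i + 1) ++ [m + 1]) =
        ((0 : Int) :: (brY ++ [m])).map (fun i => i + 1) := by
      simp
    rw [hmap] at hcons
    have hzip := segs_shift t0 (x :: xs) ((0 : Int) :: (brY ++ [m])) htys0 htys1
    rw [← List.map_tail] at hzip
    simp only [List.tail_cons] at hzip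
    calc List.map (fun se => (pyAt (t0 :: x :: xs) se.1, pyAt (t0 :: x :: xs) (se.2 - 1)))
          (((0 : Int) :: 1 :: (brY.map (fun i => i + 1) ++ [m + 1])).zip
            (1 :: (brY.map (fun i => i + 1) ++ [m + 1])))
        = (t0, t0) :: List.map (fun se => (pyAt (t0 :: x :: xs) se.1, pyAt (t0 :: x :: xs) (se.2 - 1)))
            ((((0 : Int) :: (brY ++ [m])).map (fun i => i + 1)).zip
              ((brY ++ [m]).map (fun i => i + 1))) := by
          rw [hmap, hcons]
          simp [pyAt_zero]
      _ = (t0, t0) :: List.map (fun se => (pyAt (x :: xs) se.1, pyAt (x :: xs) (se.2 - 1)))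
            (((0 : Int) :: (brY ++ [m])).zip (brY ++ [m])) := by
          rw [hzip]
  · simp only [if_neg h, List.nil_append]
    obtain ⟨e0, tr, htys⟩ := List.exists_cons_of_ne_nil
      (by simp : (brY ++ [m]) ≠ ([] : List Int))
    have he0 : 1 ≤ e0 := htys1 e0 (by rw [htys]; exact List.mem_cons_self ..)
    have htr : ∀ e ∈ tr, 1 ≤ e := fun e he => htys1 e (by rw [htys]; exact List.mem_cons_of_mem _ he)
    have hzip := segs_shift t0 (x :: xs) (brY ++ [m])
      (fun s hs => by have := htys1 s hs; omega) (by rw [htys]; simpa using htr)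
    rw [← List.map_tail] at hzip
    rw [htys] at hzip
    simp only [List.map_cons, List.tail_cons] at hzip
    rw [hmap, htys]
    simp only [List.map_cons, List.zip_cons_cons, List.map_cons]
    rw [hzip]
    simp only [add_sub_cancel_right]
    rw [pyAt_zero, pyAt_cons_pred t0 (x :: xs) e0 he0]
    simp [setFst]

theorem portB_eq_chunks (mg : Int) (rest : List Int) : ∀ (t0 : Int),
    get_full_lot_ranges_alt (t0 :: rest) mg = chunks mg t0 t0 rest := by
  induction rest with
  | nil =>
    intro t0
    simp [get_full_lot_ranges_alt, chunks, PySem.List.pyRange_one_eq_nil,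
      PySem.List.slice_from_one, pyAt]
  | cons x xs ih =>
    intro t0
    rw [portB_cons, ih x]
    by_cases h : x - t0 ≤ mg
    · rw [if_neg (by omega)]
      simp only [chunks, if_pos h]
      rw [← chunks_setFst mg xs t0 x x]
    · rw [if_pos (by omega)]
      simp [chunks, h]

-- ===== VERDICT (by name: the statement is the Claim_ definition above) =====
theorem get_full_lot_ranges_spec : Claim_equal_get_full_lot_ranges := by
  intro timestamps max_gap _ hpre
  unfold Spec_get_full_lot_ranges
  match timestamps with
  | [] => exact absurd rfl hpre
  | t0 :: rest => rw [portA_eq_chunks, portB_eq_chunks]
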